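-- pv_equiv track=rewrite | github.com/ValerieWang628/Magical-Desicion-Maker-Box | TP_RankBased_SchulzeBeatPath.py | underdogOverriderFinder
-- ===== SOURCE A (Python) =====
-- def pathIdentifier(matrix, playerList):
--     '''This is a helper func, calculating all two-way paths,
--        later used in the smithSetFinder func. '''
--     combSet = set() # initializing an empty set for all combinations
--     for i in range(len(playerList)):
--         for j in range(i+1,len(playerList)):
--             combSet.add((playerList[i], playerList[j]))
--     # this is to generate a pairwise set
--     # all combinations provided
--     rows, cols = len(matrix), len(matrix[0])
--     scoreList = []
--     for pair in combSet:
--         score = dict.fromkeys(pair, 0)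
--         for player in pair:
--             for c in range(cols):
--                 for r in range(1,rows):
--                     if matrix[r][c] == player:
--                         score[player] += matrix[0][c]
--                         break
--                     if matrix[r][c] in pair:
--                         score[matrix[r][c]] += matrix[0][c]
--                         break
--             break
--         scoreList.append(score)
--     return scoreList, combSet
--
-- def positiveBeatFinder(matrix, playerList):
--     '''this is a helper func to only count the winner in the
--         pairwise battle'''
--     if len(playerList) <= 1: raise Exception('Start with at least two players.')
--     scoreList, combSet = pathIdentifier(matrix, playerList)
--     scoreBeatList = []
--     for score in scoreList:
--         scoreBeat = score.copy()
--         # this is to prevent the original score from being modified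
--         # scoreBeat will only record positive path
--         # and set loser beat to 0
--         for player in scoreBeat:
--             # ties get 0 for both direction
--             if score[player] == max(score.values()):
--                 scoreBeat[player] -= sorted(score.values())[0]
--             else: scoreBeat[player] = 0
--         scoreBeatList.append(scoreBeat)
--     return scoreBeatList
--
-- def underdogOverriderFinder(matrix,playerList):
--     '''This is a helper func to identify the all-time loser,
--         and all-time winner.
--         An all-time loser will never show up in smith set.
--         Eliminate underdog first.
--         An all-time winner is the smith set itself.
--         Most of the time there might not be an all-time winner and loser.'''
--     playerSet = set(playerList)
--     scoreBeatList = positiveBeatFinder(matrix,playerList)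
--     atLeastOneWin, atLeastOneLose = set(),set()
--     for scoreBeat in scoreBeatList:
--         for player in scoreBeat:
--             if scoreBeat[player] != 0:
--                 atLeastOneWin.add(player)
--             else: atLeastOneLose.add(player)
--     underdogSet = playerSet - atLeastOneWin
--     overriderSet = playerSet - atLeastOneLose
--     return underdogSet, overriderSet, scoreBeatList
-- ===== SOURCE B (Python) =====
-- def underdogOverriderFinder(matrix, playerList):
--     '''Identify the all-time loser set, all-time winner set and the list of
--        pairwise positive-beat dicts, by precomputing each player's first-
--        occurrence row per column so every pair/column comparison is O(1).'''
--     if len(playerList) <= 1: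
--         raise Exception('Start with at least two players.')
--     playerSet = set(playerList)
--     combSet = set()
--     for i in range(len(playerList)):
--         for j in range(i + 1, len(playerList)):
--             combSet.add((playerList[i], playerList[j]))
--     rows, cols = len(matrix), len(matrix[0])
--     weights = matrix[0]
--     # first[p][c] = first row (from row 1 on) where player p appears in column c; rows = absent
--     first = {}
--     for p in playerSet:
--         poss = []
--         for c in range(cols):
--             col = [row[c] for row in matrix[1:]]
--             poss.append(col.index(p) + 1 if p in col else rows)
--         first[p] = poss
--     scoreBeatList = []
--     winners, losers = set(), set()
--     for pair in combSet:
--         a, b = pair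
--         if a == b:
--             scoreBeatList.append({a: 0})
--             losers.add(a)
--             continue
--         fa, fb = first[a], first[b]
--         sa = sb = 0
--         for c in range(cols):
--             if fa[c] < fb[c]:
--                 sa += weights[c]
--             elif fb[c] < fa[c]:
--                 sb += weights[c]
--         beat = {a: sa - sb if sa > sb else 0, b: sb - sa if sb > sa else 0}
--         scoreBeatList.append(beat)
--         for p in pair:
--             if beat[p] != 0:
--                 winners.add(p)
--             else:
--                 losers.add(p)
--     return playerSet - winners, playerSet - losers, scoreBeatList
-- ===== Notes on version B (the rewrite author's own statement) =====
-- stated objective: faster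
-- what changed: B precomputes each player's first-occurrence row per column once and scores every pair by O(1) position comparisons per column, accumulating the winner/loser sets in the same single pass, instead of A's re-scan of the matrix rows for every pair and column.
-- outside the precondition, e.g. on underdogOverriderFinder([[1, 1], [7, 7], [9]], [7, 8]): A returns ({8}, {7}, [{7: 2, 8: 0}]), B raises IndexError
import Mathlib
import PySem

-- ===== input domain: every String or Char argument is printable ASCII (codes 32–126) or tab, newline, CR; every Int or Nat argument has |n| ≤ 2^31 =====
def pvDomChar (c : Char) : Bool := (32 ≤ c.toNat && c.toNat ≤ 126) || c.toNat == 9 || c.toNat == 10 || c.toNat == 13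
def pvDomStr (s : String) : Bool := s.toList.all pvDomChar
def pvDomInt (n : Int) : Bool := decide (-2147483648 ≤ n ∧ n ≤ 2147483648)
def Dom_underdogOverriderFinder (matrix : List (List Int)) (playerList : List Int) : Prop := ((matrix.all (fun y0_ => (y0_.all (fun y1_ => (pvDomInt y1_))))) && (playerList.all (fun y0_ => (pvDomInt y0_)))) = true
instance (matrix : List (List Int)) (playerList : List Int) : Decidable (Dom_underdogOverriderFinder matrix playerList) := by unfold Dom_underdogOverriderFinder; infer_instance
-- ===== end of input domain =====

-- B precomputes each player's first-occurrence row per column once, so scoring a pair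
-- costs O(1) per column instead of a row scan per pair and column (objective: faster).

-- ===== PORT A =====
-- The list `scoreBeatList` returned by the Python follows the iteration order of the
-- CPython `set` holding the pairs.  PySem does not model set iteration order, so the
-- following is a hand-written, exact model of a CPython set of pairs of ints
-- (|n| ≤ 2^31): tuple hash (xxHash based), open addressing with linear probes and
-- perturbation, growth ×4 at 3/5 load; iteration = table order.  It is shared by both
-- ports (both Pythons build the same set with the same double loop).

def pvM : Nat := 18446744073709551616  -- 2^64

def pvLane (x : Int) : Nat := ((if x = -1 then -2 else x) % (18446744073709551616 : Int)).toNat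

def pvHashStep (acc lane : Nat) : Nat :=
  let a1 := (acc + lane * 14029467366897019727) % pvM
  let a2 := (a1 * 2147483648) % pvM + a1 / 8589934592   -- rotate left by 31 in 64 bits
  (a2 * 11400714785074694791) % pvM

def pvPairHash (p : Int × Int) : Nat :=
  let acc := pvHashStep (pvHashStep 2870177450012600261 (pvLane p.1)) (pvLane p.2)
  let acc := (acc + Nat.xor 2 (Nat.xor 2870177450012600261 3527539)) % pvM
  if acc = pvM - 1 then 1546275796 else acc

structure PvSet where
  table : List (Option (Int × Int))
  fill : Nat
deriving Repr, DecidableEq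

def pvSetEmpty : PvSet := { table := List.replicate 8 none, fill := 0 }

-- linear probe window of set_add_entry: some (some j) = free slot, some none = key present
def pvLinScan (table : List (Option (Int × Int))) (key : Int × Int) :
    List Nat → Option (Option Nat)
  | [] => none
  | j :: js =>
    match table.getD j none with
    | none => some (some j)
    | some e => if e = key then some none else pvLinScan table key js

-- probe loop of set_add_entry: some i = free slot for key, none = key already present
-- (fuel only makes the recursion structural; it is never exhausted at ≤ 3/5 load)
def pvProbe (table : List (Option (Int × Int))) (key : Int × Int) (mask : Nat) :
    Nat → Nat → Nat → Option Nat
  | 0, _, _ => none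
  | fuel + 1, perturb, i =>
    match table.getD i none with
    | none => some i
    | some e =>
      if e = key then none
      else if i + 9 ≤ mask then
        match pvLinScan table key (List.range' (i + 1) 9) with
        | some r => r
        | none => pvProbe table key mask fuel (perturb / 32) ((i * 5 + 1 + perturb / 32) % (mask + 1))
      else pvProbe table key mask fuel (perturb / 32) ((i * 5 + 1 + perturb / 32) % (mask + 1))

def pvLinScanClean (table : List (Option (Int × Int))) : List Nat → Option Nat
  | [] => none
  | j :: js =>
    match table.getD j none with
    | none => some j
    | some _ => pvLinScanClean table js

-- probe loop of set_insert_clean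
def pvProbeClean (table : List (Option (Int × Int))) (mask : Nat) :
    Nat → Nat → Nat → Option Nat
  | 0, _, _ => none
  | fuel + 1, perturb, i =>
    match table.getD i none with
    | none => some i
    | some _ =>
      if i + 9 ≤ mask then
        match pvLinScanClean table (List.range' (i + 1) 9) with
        | some j => some j
        | none => pvProbeClean table mask fuel (perturb / 32) ((i * 5 + 1 + perturb / 32) % (mask + 1))
      else pvProbeClean table mask fuel (perturb / 32) ((i * 5 + 1 + perturb / 32) % (mask + 1))

def pvInsertClean (table : List (Option (Int × Int))) (key : Int × Int) :
    List (Option (Int × Int)) :=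
  match pvProbeClean table (table.length - 1) (table.length + 64) (pvPairHash key)
      (pvPairHash key % (table.length - 1 + 1)) with
  | some i => table.set i (some key)
  | none => table

def pvNewSize (minused : Nat) : Nat :=
  (List.range 64).foldl (fun s _ => if s ≤ minused then s * 2 else s) 8

def pvResize (table : List (Option (Int × Int))) (fill : Nat) : PvSet :=
  { table := (table.filterMap id).foldl pvInsertClean
      (List.replicate (pvNewSize (if fill > 50000 then fill * 2 else fill * 4)) none),
    fill := fill }

def PvSet.add (s : PvSet) (key : Int × Int) : PvSet :=
  match pvProbe s.table key (s.table.length - 1) (s.table.length + 64) (pvPairHash key)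
      (pvPairHash key % (s.table.length - 1 + 1)) with
  | none => s
  | some i =>
    if (s.fill + 1) * 5 < (s.table.length - 1) * 3 then
      { table := s.table.set i (some key), fill := s.fill + 1 }
    else pvResize (s.table.set i (some key)) (s.fill + 1)

def PvSet.toList (s : PvSet) : List (Int × Int) := s.table.filterMap id

-- the double loop building combSet (identical in both Pythons)
def pvCombSet (playerList : List Int) : PvSet :=
  (PySem.List.pyRange 0 (PySem.List.len playerList) 1).foldl
    (fun s i =>
      (PySem.List.pyRange (i + 1) (PySem.List.len playerList) 1).foldl
        (fun s j =>
          PvSet.add s (PySem.List.pyGetD playerList i 0, PySem.List.pyGetD playerList j 0))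
        s)
    pvSetEmpty

-- the r-loop of pathIdentifier: scan matrix[r][c] for r in rs, with the two breaks
def pvRowScan (matrix : List (List Int)) (rs : List Int) (c w a b : Int)
    (score : PySem.Dict Int Int) : PySem.Dict Int Int :=
  match rs with
  | [] => score
  | r :: rest =>
    let cell := PySem.List.pyGetD (PySem.List.pyGetD matrix r []) c 0
    if cell = a then score.modify a 0 (· + w)
    else if cell = a ∨ cell = b then score.modify cell 0 (· + w)
    else pvRowScan matrix rest c w a b score

-- the per-pair body of pathIdentifier ('for player in pair: … break' runs once, player = pair.1)
def pvPairScore (matrix : List (List Int)) (pair : Int × Int) : PySem.Dict Int Int :=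
  let score := (PySem.Dict.empty.insert pair.1 (0 : Int)).insert pair.2 0
  let rows := PySem.List.len matrix
  let cols := PySem.List.len (PySem.List.pyGetD matrix 0 [])
  (PySem.List.pyRange 0 cols 1).foldl
    (fun sc c =>
      pvRowScan matrix (PySem.List.pyRange 1 rows 1) c
        (PySem.List.pyGetD (PySem.List.pyGetD matrix 0 []) c 0) pair.1 pair.2 sc)
    score

def pvPathIdentifier (matrix : List (List Int)) (playerList : List Int) :
    List (PySem.Dict Int Int) × List (Int × Int) :=
  let pairs := (pvCombSet playerList).toList
  let scoreList := pairs.foldl (fun acc pair => acc ++ [pvPairScore matrix pair]) []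
  (scoreList, pairs)

def pvBeat (score : PySem.Dict Int Int) : PySem.Dict Int Int :=
  score.keys.foldl
    (fun sb player =>
      if score.getD player 0 = (PySem.List.max? score.values (fun v => v)).getD 0 then
        sb.modify player 0
          (· - PySem.List.pyGetD (PySem.List.sorted score.values (fun v => v) false) 0 0)
      else sb.insert player 0)
    score

def pvPositiveBeatFinder (matrix : List (List Int)) (playerList : List Int) :
    List (PySem.Dict Int Int) :=
  -- 'if len(playerList) <= 1: raise' — those inputs are outside Pre_
  let scoreList := (pvPathIdentifier matrix playerList).1
  scoreList.foldl (fun acc score => acc ++ [pvBeat score]) []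

def underdogOverriderFinder (matrix : List (List Int)) (playerList : List Int) :
    List Int × List Int × (List (List (Int × Int))) :=
  let playerSet := PySem.Set.ofList playerList
  let scoreBeatList := pvPositiveBeatFinder matrix playerList
  let wl := scoreBeatList.foldl
    (fun (wl : PySem.Set Int × PySem.Set Int) sb =>
      sb.keys.foldl
        (fun wl player =>
          if sb.getD player 0 ≠ 0 then (PySem.Set.add wl.1 player, wl.2)
          else (wl.1, PySem.Set.add wl.2 player))
        wl)
    (PySem.Set.empty, PySem.Set.empty)
  (PySem.Set.diff playerSet wl.1, PySem.Set.diff playerSet wl.2,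
   scoreBeatList.map (fun d => d.items))

-- ===== PORT B =====
-- first[p] of Source B: first-occurrence row of p in every column ('col.index(p) + 1 if p in col
-- else rows'; the match on index? is exactly the 'p in col' conditional)
def pvFirstRow (matrix : List (List Int)) (cols rows : Int) (p : Int) : List Int :=
  (PySem.List.pyRange 0 cols 1).foldl
    (fun acc c =>
      let col := (PySem.List.slice matrix (some 1) none).map
        (fun row => PySem.List.pyGetD row c 0)
      acc ++ [match PySem.List.index? col p with
              | some k => (k : Int) + 1
              | none => rows])
    []

-- the body of Source B's 'for pair in combSet' loop
def pvAltPairStep (matrix : List (List Int)) (first : PySem.Dict Int (List Int))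
    (weights : List Int) (cols : Int)
    (st : List (List (Int × Int)) × PySem.Set Int × PySem.Set Int) (pair : Int × Int) :
    List (List (Int × Int)) × PySem.Set Int × PySem.Set Int :=
  if pair.1 = pair.2 then
    (st.1 ++ [[(pair.1, (0 : Int))]], st.2.1, PySem.Set.add st.2.2 pair.1)
  else
    let fa := first.getD pair.1 []
    let fb := first.getD pair.2 []
    let s := (PySem.List.pyRange 0 cols 1).foldl
      (fun (s : Int × Int) c =>
        if PySem.List.pyGetD fa c 0 < PySem.List.pyGetD fb c 0 then
          (s.1 + PySem.List.pyGetD weights c 0, s.2)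
        else if PySem.List.pyGetD fb c 0 < PySem.List.pyGetD fa c 0 then
          (s.1, s.2 + PySem.List.pyGetD weights c 0)
        else s)
      ((0 : Int), (0 : Int))
    let beatA : Int := if s.2 < s.1 then s.1 - s.2 else 0
    let beatB : Int := if s.1 < s.2 then s.2 - s.1 else 0
    -- 'for p in pair: ...' over the 2-tuple, unrolled
    let wl1 := if beatA ≠ 0 then (PySem.Set.add st.2.1 pair.1, st.2.2)
               else (st.2.1, PySem.Set.add st.2.2 pair.1)
    let wl2 := if beatB ≠ 0 then (PySem.Set.add wl1.1 pair.2, wl1.2)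
               else (wl1.1, PySem.Set.add wl1.2 pair.2)
    (st.1 ++ [[(pair.1, beatA), (pair.2, beatB)]], wl2)

def underdogOverriderFinder_alt (matrix : List (List Int)) (playerList : List Int) :
    List Int × List Int × (List (List (Int × Int))) :=
  let playerSet := PySem.Set.ofList playerList
  let combSet := pvCombSet playerList
  let rows : Int := PySem.List.len matrix
  let weights := PySem.List.pyGetD matrix 0 []
  let cols : Int := PySem.List.len weights
  -- 'for p in playerSet: first[p] = ...' (a Dict only looked up afterwards)
  let first := playerSet.foldl
    (fun d p => d.insert p (pvFirstRow matrix cols rows p)) PySem.Dict.empty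
  let res := combSet.toList.foldl (pvAltPairStep matrix first weights cols)
    ([], PySem.Set.empty, PySem.Set.empty)
  (PySem.Set.diff playerSet res.2.1, PySem.Set.diff playerSet res.2.2, res.1)

-- ===== PRECONDITION & SPEC =====
-- Pre_ excludes the inputs on which A raises (empty matrix, fewer than two players,
-- and ragged matrices whose short rows the column scans reach — IndexError), and with
-- them the ragged matrices on which A only returns because every column scan happens
-- to break off before reaching a short row: whether A raises there is an accident of
-- scan order, and B's single per-column pass reads every row.
def Pre_underdogOverriderFinder (matrix : List (List Int)) (playerList : List Int) : Prop :=
  matrix ≠ [] ∧ 2 ≤ playerList.length ∧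
    ∀ row ∈ matrix, (matrix.headD []).length ≤ row.length
instance (matrix : List (List Int)) (playerList : List Int) :
    Decidable (Pre_underdogOverriderFinder matrix playerList) := by
  unfold Pre_underdogOverriderFinder; infer_instance

def pvWitness_underdogOverriderFinder : List (List Int) × List Int :=
  ([[1, 2], [3, 4], [4, 3]], [3, 4])

def Spec_underdogOverriderFinder (matrix : List (List Int)) (playerList : List Int)
    (out : List Int × List Int × (List (List (Int × Int)))) : Prop :=
  out = underdogOverriderFinder_alt matrix playerList
instance (matrix : List (List Int)) (playerList : List Int)
    (out : List Int × List Int × (List (List (Int × Int)))) :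
    Decidable (Spec_underdogOverriderFinder matrix playerList out) := by
  unfold Spec_underdogOverriderFinder; infer_instance

-- ===== CLAIM (what is proved, stated in full; the proofs are below) =====
def Claim_equal_underdogOverriderFinder : Prop := ∀ (matrix : List (List Int)) (playerList : List Int), Dom_underdogOverriderFinder matrix playerList → Pre_underdogOverriderFinder matrix playerList → Spec_underdogOverriderFinder matrix playerList (underdogOverriderFinder matrix playerList)

-- ===== LEMMAS AND PROOFS =====

-- ---- membership through the set model ----
def pvElems (t : List (Option (Int × Int))) : List (Int × Int) := t.filterMap id

theorem pvElems_set (t : List (Option (Int × Int))) (i : Nat) (k x : Int × Int)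
    (hx : x ∈ pvElems (t.set i (some k))) : x = k ∨ x ∈ pvElems t := by
  simp only [pvElems, List.mem_filterMap, id, Option.mem_def] at hx ⊢
  obtain ⟨a, ha, hax⟩ := hx
  rcases List.mem_or_eq_of_mem_set ha with h | h
  · exact Or.inr ⟨a, h, hax⟩
  · subst h; cases hax; exact Or.inl rfl

theorem pvMem_insertClean (t : List (Option (Int × Int))) (k x : Int × Int)
    (hx : x ∈ pvElems (pvInsertClean t k)) : x = k ∨ x ∈ pvElems t := by
  unfold pvInsertClean at hx
  rcases hp : pvProbeClean t (t.length - 1) (t.length + 64) (pvPairHash k)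
      (pvPairHash k % (t.length - 1 + 1)) with _ | i
  · rw [hp] at hx; exact Or.inr hx
  · rw [hp] at hx; exact pvElems_set t i k x hx

theorem pvMem_foldl_insertClean (l : List (Int × Int)) (t : List (Option (Int × Int)))
    (x : Int × Int) (hx : x ∈ pvElems (l.foldl pvInsertClean t)) :
    x ∈ l ∨ x ∈ pvElems t := by
  induction l generalizing t with
  | nil => exact Or.inr hx
  | cons y ys ih =>
    simp only [List.foldl_cons] at hx
    rcases ih (pvInsertClean t y) hx with h | h
    · exact Or.inl (List.mem_cons_of_mem y h)
    · rcases pvMem_insertClean t y x h with h2 | h2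
      · exact Or.inl (h2 ▸ List.mem_cons_self ..)
      · exact Or.inr h2

theorem pvMem_add (s : PvSet) (k x : Int × Int) (hx : x ∈ (PvSet.add s k).toList) :
    x = k ∨ x ∈ s.toList := by
  unfold PvSet.add at hx
  rcases hp : pvProbe s.table k (s.table.length - 1) (s.table.length + 64) (pvPairHash k)
      (pvPairHash k % (s.table.length - 1 + 1)) with _ | i
  · rw [hp] at hx; exact Or.inr hx
  · rw [hp] at hx
    simp only at hx
    by_cases hc : (s.fill + 1) * 5 < (s.table.length - 1) * 3
    · rw [if_pos hc] at hx
      exact pvElems_set s.table i k x hx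
    · rw [if_neg hc] at hx
      unfold pvResize at hx
      simp only [PvSet.toList] at hx
      rcases pvMem_foldl_insertClean _ _ _ hx with h | h
      · rcases pvElems_set s.table i k x h with h2 | h2
        · exact Or.inl h2
        · exact Or.inr h2
      · simp [pvElems, List.filterMap_replicate] at h

theorem pvMem_foldl_addg {β : Type} (g : β → Int × Int) (l : List β) (s0 : PvSet)
    (x : Int × Int) (hx : x ∈ ((l.foldl (fun s i => PvSet.add s (g i)) s0).toList)) :
    (∃ i ∈ l, x = g i) ∨ x ∈ s0.toList := by
  induction l generalizing s0 with
  | nil => exact Or.inr hx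
  | cons y ys ih =>
    simp only [List.foldl_cons] at hx
    rcases ih _ hx with h | h
    · obtain ⟨i, hi, hxi⟩ := h
      exact Or.inl ⟨i, List.mem_cons_of_mem y hi, hxi⟩
    · rcases pvMem_add _ _ _ h with h2 | h2
      · exact Or.inl ⟨y, List.mem_cons_self .., h2⟩
      · exact Or.inr h2

theorem pvMem_combSet (playerList : List Int) (x : Int × Int)
    (hx : x ∈ (pvCombSet playerList).toList) : x.1 ∈ playerList ∧ x.2 ∈ playerList := by
  unfold pvCombSet at hx
  have main : ∀ (li : List Int) (s0 : PvSet),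
      x ∈ ((li.foldl (fun s i =>
        (PySem.List.pyRange (i + 1) (PySem.List.len playerList) 1).foldl
          (fun s j => PvSet.add s (PySem.List.pyGetD playerList i 0,
            PySem.List.pyGetD playerList j 0)) s) s0).toList) →
      (∀ i ∈ li, PySem.Raise.InRange playerList.length i) →
      (x.1 ∈ playerList ∧ x.2 ∈ playerList) ∨ x ∈ s0.toList := by
    intro li
    induction li with
    | nil => intro s0 h _; exact Or.inr h
    | cons y ys ih =>
      intro s0 h hr
      simp only [List.foldl_cons] at h
      rcases ih _ h (fun i hi => hr i (List.mem_cons_of_mem y hi)) with h2 | h2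
      · exact Or.inl h2
      · rcases pvMem_foldl_addg _ _ _ _ h2 with h3 | h3
        · obtain ⟨j, hj, hxj⟩ := h3
          have hjr : PySem.Raise.InRange playerList.length j := by
            rw [PySem.List.mem_pyRange_one] at hj
            have h2y := hr y (List.mem_cons_self ..)
            obtain ⟨h2a, h2b⟩ := h2y
            simp only [PySem.List.len_eq] at hj
            exact ⟨by omega, by omega⟩
          refine Or.inl ?_
          rw [hxj]
          exact ⟨PySem.List.pyGetD_mem playerList 0 (hr y (List.mem_cons_self ..)),
                 PySem.List.pyGetD_mem playerList 0 hjr⟩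
        · exact Or.inr h3
  rcases main _ _ hx (fun i hi => by
      rw [PySem.List.mem_pyRange_one] at hi
      simp only [PySem.List.len_eq] at hi
      exact ⟨by omega, by omega⟩) with h | h
  · exact h
  · simp [PvSet.toList, pvSetEmpty, pvElems, List.filterMap_replicate] at h

-- ---- per-pair score characterisation ----

def pvCol (matrix : List (List Int)) (c : Int) : List Int :=
  (matrix.drop 1).map (fun row => PySem.List.pyGetD row c 0)

def pvPos (u : List Int) (rows p : Int) : Int :=
  match PySem.List.index? u p with
  | some k => (k : Int) + 1
  | none => rows

theorem pvRowScan_eq_find_aux (matrix : List (List Int)) (c w a b : Int) :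
    ∀ (rs : List Int) (d : PySem.Dict Int Int),
    pvRowScan matrix rs c w a b d =
      match (rs.map (fun r => PySem.List.pyGetD (PySem.List.pyGetD matrix r []) c 0)).find?
          (fun v => v == a || v == b) with
      | none => d
      | some v => if v = a then d.modify a 0 (· + w) else d.modify v 0 (· + w) := by
  intro rs
  induction rs with
  | nil => intro d; simp [pvRowScan]
  | cons r rest ih =>
    intro d
    rw [pvRowScan]
    simp only [List.map_cons, List.find?_cons]
    by_cases h1 : PySem.List.pyGetD (PySem.List.pyGetD matrix r []) c 0 = a
    · rw [if_pos h1]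
      simp [h1]
    · by_cases h2 : PySem.List.pyGetD (PySem.List.pyGetD matrix r []) c 0 = b
      · rw [if_neg h1, if_pos (Or.inr h2)]
        simp only [h2, List.find?_cons]
        have : ((b == a) || (b == b)) = true := by simp
        rw [this]
        have hba : ¬ b = a := fun h => h1 (h ▸ h2)
        simp [hba]
      · rw [if_neg h1, if_neg (by tauto)]
        have hb : ((PySem.List.pyGetD (PySem.List.pyGetD matrix r []) c 0 == a) ||
            (PySem.List.pyGetD (PySem.List.pyGetD matrix r []) c 0 == b)) = false := by
          simp [h1, h2]
        rw [hb]
        exact ih d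

-- A's row scan is 'update by the first cell of the column that lies in the pair'
theorem pvRowScan_eq_find (matrix : List (List Int)) (c w a b : Int)
    (d : PySem.Dict Int Int) :
    pvRowScan matrix (PySem.List.pyRange 1 (PySem.List.len matrix) 1) c w a b d =
      match (pvCol matrix c).find? (fun v => v == a || v == b) with
      | none => d
      | some v => if v = a then d.modify a 0 (· + w) else d.modify v 0 (· + w) := by
  rw [pvRowScan_eq_find_aux]
  have h1 : (PySem.List.pyRange 1 (PySem.List.len matrix) 1).map
      (fun r => PySem.List.pyGetD (PySem.List.pyGetD matrix r []) c 0) =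
      ((PySem.List.pyRange 1 (PySem.List.len matrix) 1).map
        (fun r => PySem.List.pyGetD matrix r [])).map (fun row => PySem.List.pyGetD row c 0) := by
    rw [List.map_map]
    exact List.map_congr_left (fun x _ => rfl)
  rw [h1, PySem.List.map_pyGetD_pyRange matrix [] (by norm_num)]
  rfl

-- the first cell in {a, b} is the player with the smaller first-occurrence position
theorem pvFind_eq_pos (u : List Int) (rows a b : Int) (hab : a ≠ b)
    (hlen : (u.length : Int) < rows) :
    u.find? (fun v => v == a || v == b) =
      if pvPos u rows a < pvPos u rows b then some a
      else if pvPos u rows b < pvPos u rows a then some b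
      else none := by
  have posbound : ∀ (l : List Int) (p : Int) (k : Nat), PySem.List.index? l p = some k →
      k < l.length := by
    intro l p k hk
    obtain ⟨hlt, _, _⟩ := PySem.List.getElem_of_index?_eq_some hk
    exact hlt
  induction u with
  | nil =>
    simp [pvPos, PySem.List.index?_eq_none_iff]
  | cons v rest ih =>
    have hlen' : ((rest.length : Int)) < rows := by
      simp only [List.length_cons] at hlen; push_cast at hlen ⊢; omega
    by_cases hva : v = a
    · rw [hva]
      have hpa : pvPos (a :: rest) rows a = 1 := by
        rw [pvPos, PySem.List.index?_cons_self]; simp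
      have hpb : 1 < pvPos (a :: rest) rows b := by
        rw [pvPos, PySem.List.index?_cons_of_ne _ hab]
        rcases hk : PySem.List.index? rest b with _ | k'
        · simp only [Option.map_none]
          simp only [List.length_cons] at hlen; push_cast at hlen; omega
        · simp only [Option.map_some]
          push_cast
          omega
      rw [if_pos (by omega)]
      simp
    · by_cases hvb : v = b
      · rw [hvb]
        have hpb : pvPos (b :: rest) rows b = 1 := by
          rw [pvPos, PySem.List.index?_cons_self]; simp
        have hpa : 1 < pvPos (b :: rest) rows a := by
          rw [pvPos, PySem.List.index?_cons_of_ne _ (fun h : b = a => hab h.symm)]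
          rcases hk : PySem.List.index? rest a with _ | k'
          · simp only [Option.map_none]
            simp only [List.length_cons] at hlen; push_cast at hlen; omega
          · simp only [Option.map_some]
            push_cast
            omega
        rw [if_neg (by omega), if_pos (by omega)]
        have hba : ¬ b = a := fun h => hab h.symm
        simp [hba]
      · have hstep : ∀ p : Int, v ≠ p →
            (pvPos (v :: rest) rows p = pvPos rest rows p + 1 ∧ p ∈ rest) ∨
            (pvPos (v :: rest) rows p = rows ∧ pvPos rest rows p = rows ∧ p ∉ rest) := by
          intro p hvp
          rw [pvPos, pvPos, PySem.List.index?_cons_of_ne _ hvp]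
          rcases hk : PySem.List.index? rest p with _ | k'
          · right
            refine ⟨by simp, by simp, ?_⟩
            exact (PySem.List.index?_eq_none_iff rest p).mp hk
          · left
            constructor
            · simp
            · have := PySem.List.index?_isSome_iff rest p
              rw [hk] at this; simpa using this
        have hfind : (v :: rest).find? (fun x => x == a || x == b) =
            rest.find? (fun x => x == a || x == b) := by
          simp only [List.find?_cons]
          have : ((v == a) || (v == b)) = false := by simp [hva, hvb]
          rw [this]
        rw [hfind, ih hlen']
        have hposle : ∀ p : Int, ∀ k : Nat, PySem.List.index? rest p = some k →
            pvPos rest rows p ≤ (rest.length : Int) := by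
          intro p k hk
          rw [pvPos, hk]
          have := posbound rest p k hk
          simp only
          push_cast
          omega
        have hlc : ((rest.length : Int)) + 1 < rows + 1 := by omega
        have hl2 : ((rest.length : Int)) + 1 < rows := by
          simp only [List.length_cons] at hlen; push_cast at hlen; omega
        have hexist : ∀ p : Int, p ∈ rest → ∃ k, PySem.List.index? rest p = some k := by
          intro p hp
          rcases hk : PySem.List.index? rest p with _ | k
          · exact absurd ((PySem.List.index?_eq_none_iff rest p).mp hk) (by simpa using hp)
          · exact ⟨k, rfl⟩
        rcases hstep a hva with ⟨ha1, ha2⟩ | ⟨ha1, ha2, ha3⟩ <;>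
          rcases hstep b hvb with ⟨hb1, hb2⟩ | ⟨hb1, hb2, hb3⟩
        · rw [ha1, hb1]
          rcases lt_trichotomy (pvPos rest rows a) (pvPos rest rows b) with h|h|h
          · rw [if_pos h, if_pos (show pvPos rest rows a + 1 < pvPos rest rows b + 1 by omega)]
          · rw [if_neg (show ¬ pvPos rest rows a < pvPos rest rows b by omega),
                if_neg (show ¬ pvPos rest rows b < pvPos rest rows a by omega),
                if_neg (show ¬ pvPos rest rows a + 1 < pvPos rest rows b + 1 by omega),
                if_neg (show ¬ pvPos rest rows b + 1 < pvPos rest rows a + 1 by omega)]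
          · rw [if_neg (show ¬ pvPos rest rows a < pvPos rest rows b by omega), if_pos h,
                if_neg (show ¬ pvPos rest rows a + 1 < pvPos rest rows b + 1 by omega),
                if_pos (show pvPos rest rows b + 1 < pvPos rest rows a + 1 by omega)]
        · obtain ⟨ka, hka⟩ := hexist a ha2
          have h1 := hposle a ka hka
          rw [ha1, hb1, hb2]
          rw [if_pos (show pvPos rest rows a < rows by omega),
              if_pos (show pvPos rest rows a + 1 < rows by omega)]
        · obtain ⟨kb, hkb⟩ := hexist b hb2
          have h1 := hposle b kb hkb
          rw [ha1, ha2, hb1]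
          rw [if_neg (show ¬ rows < pvPos rest rows b by omega),
              if_pos (show pvPos rest rows b < rows by omega),
              if_neg (show ¬ rows < pvPos rest rows b + 1 by omega),
              if_pos (show pvPos rest rows b + 1 < rows by omega)]
        · rw [ha1, ha2, hb1, hb2]

-- ---- canonical per-pair data ----

def pvW (matrix : List (List Int)) (c : Int) : Int :=
  PySem.List.pyGetD (PySem.List.pyGetD matrix 0 []) c 0

def pvCols (matrix : List (List Int)) : Int :=
  PySem.List.len (PySem.List.pyGetD matrix 0 [])

def pvPosM (matrix : List (List Int)) (p c : Int) : Int :=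
  pvPos (pvCol matrix c) (PySem.List.len matrix) p

def pvBStep (matrix : List (List Int)) (a b : Int) (s : Int × Int) (c : Int) : Int × Int :=
  if pvPosM matrix a c < pvPosM matrix b c then (s.1 + pvW matrix c, s.2)
  else if pvPosM matrix b c < pvPosM matrix a c then (s.1, s.2 + pvW matrix c)
  else s

def pvS (matrix : List (List Int)) (a b : Int) : Int × Int :=
  (PySem.List.pyRange 0 (pvCols matrix) 1).foldl (pvBStep matrix a b) (0, 0)

def pvBA (matrix : List (List Int)) (a b : Int) : Int :=
  if (pvS matrix a b).2 < (pvS matrix a b).1 then (pvS matrix a b).1 - (pvS matrix a b).2 else 0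

def pvBB (matrix : List (List Int)) (a b : Int) : Int :=
  if (pvS matrix a b).1 < (pvS matrix a b).2 then (pvS matrix a b).2 - (pvS matrix a b).1 else 0

def pvItems (matrix : List (List Int)) (a b : Int) : List (Int × Int) :=
  if a = b then [(a, 0)] else [(a, pvBA matrix a b), (b, pvBB matrix a b)]

def pvD2 (a b x y : Int) : PySem.Dict Int Int := ⟨[(a, x), (b, y)]⟩
def pvD1 (a x : Int) : PySem.Dict Int Int := ⟨[(a, x)]⟩

def pvCW (matrix : List (List Int)) (p : Int × Int) (wl : PySem.Set Int × PySem.Set Int) :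
    PySem.Set Int × PySem.Set Int :=
  if p.1 = p.2 then (wl.1, PySem.Set.add wl.2 p.1)
  else
    let wl1 := if pvBA matrix p.1 p.2 ≠ 0 then (PySem.Set.add wl.1 p.1, wl.2)
               else (wl.1, PySem.Set.add wl.2 p.1)
    if pvBB matrix p.1 p.2 ≠ 0 then (PySem.Set.add wl1.1 p.2, wl1.2)
    else (wl1.1, PySem.Set.add wl1.2 p.2)

def pvCStep (matrix : List (List Int))
    (st : List (List (Int × Int)) × PySem.Set Int × PySem.Set Int) (p : Int × Int) :
    List (List (Int × Int)) × PySem.Set Int × PySem.Set Int :=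
  (st.1 ++ [pvItems matrix p.1 p.2], pvCW matrix p st.2)

-- ---- two-key dict computations ----

theorem pvD2_getD_a (a b x y : Int) : (pvD2 a b x y).getD a 0 = x := by
  simp [pvD2, PySem.Dict.getD, PySem.Dict.get?, List.find?_cons]

theorem pvD2_getD_b (a b x y : Int) (hab : a ≠ b) : (pvD2 a b x y).getD b 0 = y := by
  simp [pvD2, PySem.Dict.getD, PySem.Dict.get?, List.find?_cons, hab, Ne.symm hab]

theorem pvD1_getD (a x : Int) : (pvD1 a x).getD a 0 = x := by
  simp [pvD1, PySem.Dict.getD, PySem.Dict.get?, List.find?_cons]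

theorem pvD2_insert_a (a b x y v : Int) (hab : a ≠ b) :
    (pvD2 a b x y).insert a v = pvD2 a b v y := by
  simp [pvD2, PySem.Dict.insert, PySem.Dict.contains, hab, Ne.symm hab]

theorem pvD2_insert_b (a b x y v : Int) (hab : a ≠ b) :
    (pvD2 a b x y).insert b v = pvD2 a b x v := by
  simp [pvD2, PySem.Dict.insert, PySem.Dict.contains, hab, Ne.symm hab]

theorem pvD2_modify_a (a b x y : Int) (hab : a ≠ b) (f : Int → Int) :
    (pvD2 a b x y).modify a 0 f = pvD2 a b (f x) y := by
  rw [PySem.Dict.modify, pvD2_getD_a, pvD2_insert_a _ _ _ _ _ hab]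

theorem pvD2_modify_b (a b x y : Int) (hab : a ≠ b) (f : Int → Int) :
    (pvD2 a b x y).modify b 0 f = pvD2 a b x (f y) := by
  rw [PySem.Dict.modify, pvD2_getD_b _ _ _ _ hab, pvD2_insert_b _ _ _ _ _ hab]

theorem pvD1_modify (a x : Int) (f : Int → Int) : (pvD1 a x).modify a 0 f = pvD1 a (f x) := by
  rw [PySem.Dict.modify, pvD1_getD]
  simp [pvD1, PySem.Dict.insert, PySem.Dict.contains]

theorem pvD2_init (a b : Int) (hab : a ≠ b) :
    (PySem.Dict.empty.insert a (0 : Int)).insert b 0 = pvD2 a b 0 0 := by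
  simp [pvD2, PySem.Dict.insert, PySem.Dict.contains, PySem.Dict.empty, hab, Ne.symm hab]

theorem pvD1_init (a : Int) : (PySem.Dict.empty.insert a (0 : Int)).insert a 0 = pvD1 a 0 := by
  rw [PySem.Dict.insert_insert_self]
  simp [pvD1, PySem.Dict.insert, PySem.Dict.contains, PySem.Dict.empty]

-- ---- max / sorted-head on the value lists ----

theorem pvMax2 (x y : Int) : (PySem.List.max? [x, y] (fun v => v)).getD 0 = max x y := by
  rw [PySem.List.max?_id_cons]; simp

theorem pvMax1 (x : Int) : (PySem.List.max? [x] (fun v => v)).getD 0 = x := by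
  rw [PySem.List.max?_id_cons]; simp

theorem pvMinHead2 (x y : Int) :
    PySem.List.pyGetD (PySem.List.sorted [x, y] (fun v => v) false) 0 0 = min x y := by
  rcases le_total x y with h | h
  · rw [PySem.List.sorted_eq_self_of_pairwise _ _ (by simp [h])]
    simp [PySem.List.pyGetD_zero_cons, min_eq_left h]
  · rw [PySem.List.sorted_id_eq_of_perm_of_pairwise _ _ (List.Perm.swap _ _ _) (by simp [h])]
    simp [PySem.List.pyGetD_zero_cons, min_eq_right h]

theorem pvMinHead1 (x : Int) :
    PySem.List.pyGetD (PySem.List.sorted [x] (fun v => v) false) 0 0 = x := by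
  rw [PySem.List.sorted_eq_self_of_pairwise _ _ (by simp)]
  simp [PySem.List.pyGetD_zero_cons]

-- ---- pvBeat on the two dict shapes ----

theorem pvBeat_D2 (a b x y : Int) (hab : a ≠ b) :
    pvBeat (pvD2 a b x y) = pvD2 a b (if y < x then x - y else 0) (if x < y then y - x else 0) := by
  have hkeys : (pvD2 a b x y).keys = [a, b] := rfl
  have hvals : (pvD2 a b x y).values = [x, y] := rfl
  rw [pvBeat, hkeys, hvals]
  simp only [List.foldl_cons, List.foldl_nil, pvMax2, pvMinHead2, pvD2_getD_a,
    pvD2_getD_b _ _ _ _ hab]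
  rcases lt_trichotomy x y with h | h | h
  · rw [if_pos (show y = max x y by rw [max_eq_right h.le]),
        if_neg (show ¬ x = max x y by rw [max_eq_right h.le]; exact h.ne),
        pvD2_insert_a _ _ _ _ _ hab, pvD2_modify_b _ _ _ _ hab, min_eq_left h.le,
        if_neg (show ¬ y < x by omega), if_pos h]
  · rw [if_pos (show y = max x y by rw [h, max_self]),
        if_pos (show x = max x y by rw [h, max_self]),
        pvD2_modify_a _ _ _ _ hab, pvD2_modify_b _ _ _ _ hab,
        if_neg (show ¬ y < x by omega), if_neg (show ¬ x < y by omega)]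
    rw [h, min_self]
    simp
  · rw [if_neg (show ¬ y = max x y by rw [max_eq_left h.le]; exact fun hh => h.ne hh),
        if_pos (show x = max x y by rw [max_eq_left h.le]),
        pvD2_modify_a _ _ _ _ hab, pvD2_insert_b _ _ _ _ _ hab, min_eq_right h.le,
        if_pos h, if_neg (show ¬ x < y by omega)]

theorem pvBeat_D1 (a x : Int) : pvBeat (pvD1 a x) = pvD1 a 0 := by
  have hkeys : (pvD1 a x).keys = [a] := rfl
  have hvals : (pvD1 a x).values = [x] := rfl
  rw [pvBeat, hkeys, hvals]
  simp only [List.foldl_cons, List.foldl_nil, pvMax1, pvMinHead1, pvD1_getD]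
  rw [if_pos trivial, pvD1_modify]
  simp

-- ---- pvPairScore on the two shapes ----

theorem pvColStep (matrix : List (List Int)) (a b c x y : Int) (hab : a ≠ b)
    (hm : matrix ≠ []) :
    pvRowScan matrix (PySem.List.pyRange 1 (PySem.List.len matrix) 1) c (pvW matrix c) a b
        (pvD2 a b x y) =
      pvD2 a b (if pvPosM matrix a c < pvPosM matrix b c then x + pvW matrix c else x)
               (if pvPosM matrix b c < pvPosM matrix a c then y + pvW matrix c else y) := by
  have hlen : (((pvCol matrix c).length : Int)) < PySem.List.len matrix := by
    cases matrix with
    | nil => exact absurd rfl hm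
    | cons r rest =>
      simp only [pvCol, PySem.List.len_eq, List.drop_succ_cons, List.drop_zero,
        List.length_map, List.length_cons]
      push_cast
      omega
  rw [pvRowScan_eq_find, pvFind_eq_pos _ _ _ _ hab hlen]
  simp only [pvPosM]
  rcases lt_trichotomy (pvPos (pvCol matrix c) (PySem.List.len matrix) a)
      (pvPos (pvCol matrix c) (PySem.List.len matrix) b) with h | h | h
  · rw [if_pos h]
    dsimp only
    rw [if_pos rfl, pvD2_modify_a _ _ _ _ hab, if_pos h,
        if_neg (show ¬ pvPos (pvCol matrix c) (PySem.List.len matrix) b <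
          pvPos (pvCol matrix c) (PySem.List.len matrix) a by omega)]
  · rw [if_neg (show ¬ pvPos (pvCol matrix c) (PySem.List.len matrix) a <
          pvPos (pvCol matrix c) (PySem.List.len matrix) b by omega),
        if_neg (show ¬ pvPos (pvCol matrix c) (PySem.List.len matrix) b <
          pvPos (pvCol matrix c) (PySem.List.len matrix) a by omega)]
    dsimp only
    rw [if_neg (show ¬ pvPos (pvCol matrix c) (PySem.List.len matrix) a <
          pvPos (pvCol matrix c) (PySem.List.len matrix) b by omega),
        if_neg (show ¬ pvPos (pvCol matrix c) (PySem.List.len matrix) b <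
          pvPos (pvCol matrix c) (PySem.List.len matrix) a by omega)]
  · rw [if_neg (show ¬ pvPos (pvCol matrix c) (PySem.List.len matrix) a <
          pvPos (pvCol matrix c) (PySem.List.len matrix) b by omega), if_pos h]
    dsimp only
    rw [if_neg (show ¬ b = a from fun hh => hab hh.symm), pvD2_modify_b _ _ _ _ hab,
        if_neg (show ¬ pvPos (pvCol matrix c) (PySem.List.len matrix) a <
          pvPos (pvCol matrix c) (PySem.List.len matrix) b by omega), if_pos h]

theorem pvBStep_pair (matrix : List (List Int)) (a b x y c : Int) :
    pvBStep matrix a b (x, y) c =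
      (if pvPosM matrix a c < pvPosM matrix b c then x + pvW matrix c else x,
       if pvPosM matrix b c < pvPosM matrix a c then y + pvW matrix c else y) := by
  rw [pvBStep]
  rcases lt_trichotomy (pvPosM matrix a c) (pvPosM matrix b c) with h | h | h
  · rw [if_pos h, if_pos h, if_neg (by omega)]
  · rw [if_neg (by omega), if_neg (by omega), if_neg (by omega), if_neg (by omega)]
  · rw [if_neg (by omega), if_pos h, if_neg (by omega), if_pos h]

theorem pvSync (matrix : List (List Int)) (a b : Int) (hab : a ≠ b) (hm : matrix ≠ []) :
    ∀ (cs : List Int) (x y : Int),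
    cs.foldl
        (fun sc c =>
          pvRowScan matrix (PySem.List.pyRange 1 (PySem.List.len matrix) 1) c (pvW matrix c) a b sc)
        (pvD2 a b x y) =
      pvD2 a b ((cs.foldl (pvBStep matrix a b) (x, y)).1) ((cs.foldl (pvBStep matrix a b) (x, y)).2) := by
  intro cs
  induction cs with
  | nil => intro x y; rfl
  | cons c cs ih =>
    intro x y
    simp only [List.foldl_cons]
    rw [pvColStep matrix a b c x y hab hm, pvBStep_pair, ih]

theorem pvPairScore_ne (matrix : List (List Int)) (a b : Int) (hab : a ≠ b)
    (hm : matrix ≠ []) :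
    pvPairScore matrix (a, b) = pvD2 a b (pvS matrix a b).1 (pvS matrix a b).2 := by
  simp only [pvPairScore]
  rw [pvD2_init a b hab]
  exact pvSync matrix a b hab hm _ 0 0

theorem pvPairScore_eq (matrix : List (List Int)) (a : Int) :
    ∃ s, pvPairScore matrix (a, a) = pvD1 a s := by
  simp only [pvPairScore]
  rw [pvD1_init a]
  have main : ∀ (cs : List Int) (x : Int), ∃ s,
      cs.foldl
        (fun sc c =>
          pvRowScan matrix (PySem.List.pyRange 1 (PySem.List.len matrix) 1) c
            (PySem.List.pyGetD (PySem.List.pyGetD matrix 0 []) c 0) a a sc)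
        (pvD1 a x) = pvD1 a s := by
    intro cs
    induction cs with
    | nil => intro x; exact ⟨x, rfl⟩
    | cons c cs ih =>
      intro x
      simp only [List.foldl_cons]
      rw [pvRowScan_eq_find]
      rcases hf : (pvCol matrix c).find? (fun v => v == a || v == a) with _ | v
      · exact ih x
      · have hv : v = a := by
          have := List.find?_some hf
          simpa using this
        subst hv
        dsimp only
        rw [if_pos rfl, pvD1_modify]
        exact ih _
  exact main _ 0

-- ---- dict-level beat results ----

theorem pvADict_ne (matrix : List (List Int)) (a b : Int) (hab : a ≠ b) (hm : matrix ≠ []) :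
    pvBeat (pvPairScore matrix (a, b)) = pvD2 a b (pvBA matrix a b) (pvBB matrix a b) := by
  rw [pvPairScore_ne matrix a b hab hm, pvBeat_D2 _ _ _ _ hab]
  rfl

theorem pvADict_eq (matrix : List (List Int)) (a : Int) :
    pvBeat (pvPairScore matrix (a, a)) = pvD1 a 0 := by
  obtain ⟨s, hs⟩ := pvPairScore_eq matrix a
  rw [hs, pvBeat_D1]

-- ---- the first-occurrence dict of B, looked up ----

theorem pvDictLookup_notmem (F : Int → List Int) (a : Int) :
    ∀ (l : List Int), a ∉ l → ∀ d0 : PySem.Dict Int (List Int),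
    (l.foldl (fun d p => d.insert p (F p)) d0).getD a [] = d0.getD a [] := by
  intro l
  induction l with
  | nil => intro _ d0; rfl
  | cons p ps ih =>
    intro hmem d0
    simp only [List.foldl_cons]
    rw [ih (fun h => hmem (List.mem_cons_of_mem p h)), PySem.Dict.getD_insert]
    rw [if_neg (fun h : a = p => hmem (by rw [h]; exact List.mem_cons_self ..))]

theorem pvDictLookup (F : Int → List Int) (a : Int) :
    ∀ (l : List Int), l.Nodup → a ∈ l → ∀ d0 : PySem.Dict Int (List Int),
    (l.foldl (fun d p => d.insert p (F p)) d0).getD a [] = F a := by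
  intro l
  induction l with
  | nil => intro _ h; exact absurd h (List.not_mem_nil)
  | cons p ps ih =>
    intro hnd hmem d0
    simp only [List.foldl_cons]
    by_cases hap : a = p
    · rw [pvDictLookup_notmem F a ps (hap ▸ (List.nodup_cons.mp hnd).1) _,
          PySem.Dict.getD_insert, if_pos hap, hap]
    · rcases List.mem_cons.mp hmem with h | h
      · exact absurd h hap
      · exact ih (List.nodup_cons.mp hnd).2 h _

theorem pvFirstRow_lookup (matrix : List (List Int)) (q c : Int) (h0 : 0 ≤ c)
    (h1 : c < PySem.List.len (PySem.List.pyGetD matrix 0 [])) :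
    PySem.List.pyGetD
        (pvFirstRow matrix (PySem.List.len (PySem.List.pyGetD matrix 0 []))
          (PySem.List.len matrix) q) c 0 = pvPosM matrix q c := by
  simp only [pvFirstRow]
  rw [PySem.List.foldl_append_singleton_eq_map, List.nil_append,
      PySem.List.pyGetD_map_pyRange_of_nonneg _ _ _ _ h0 h1,
      PySem.List.slice_from_one, ← List.drop_one]
  rfl

-- ---- per-pair equality of the two loop bodies ----

theorem pvItems_pair (matrix : List (List Int)) (hm : matrix ≠ []) (p : Int × Int) :
    (pvBeat (pvPairScore matrix p)).items = pvItems matrix p.1 p.2 := by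
  obtain ⟨a, b⟩ := p
  by_cases hab : a = b
  · subst hab
    rw [pvADict_eq matrix a, pvItems, if_pos rfl]
    rfl
  · rw [show ((a, b) : Int × Int) = ((a, b).1, (a, b).2) from rfl,
        pvADict_ne matrix a b hab hm, pvItems, if_neg hab]
    rfl

theorem pvWA_pair (matrix : List (List Int)) (hm : matrix ≠ []) (p : Int × Int)
    (wl : PySem.Set Int × PySem.Set Int) :
    (pvBeat (pvPairScore matrix p)).keys.foldl
        (fun wl player =>
          if (pvBeat (pvPairScore matrix p)).getD player 0 ≠ 0 then
            (PySem.Set.add wl.1 player, wl.2)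
          else (wl.1, PySem.Set.add wl.2 player))
        wl = pvCW matrix p wl := by
  obtain ⟨a, b⟩ := p
  by_cases hab : a = b
  · subst hab
    rw [pvADict_eq matrix a]
    have hkeys : (pvD1 a 0).keys = [a] := rfl
    rw [hkeys]
    simp only [List.foldl_cons, List.foldl_nil, pvD1_getD]
    rw [if_neg (by simp), pvCW, if_pos rfl]
  · rw [show ((a, b) : Int × Int) = ((a, b).1, (a, b).2) from rfl,
        pvADict_ne matrix a b hab hm]
    have hkeys : (pvD2 a b (pvBA matrix a b) (pvBB matrix a b)).keys = [a, b] := rfl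
    rw [hkeys]
    simp only [List.foldl_cons, List.foldl_nil, pvD2_getD_a, pvD2_getD_b _ _ _ _ hab]
    simp only [pvCW, if_neg hab]

theorem pvAltStep_eq (matrix : List (List Int)) (playerList : List Int) (hm : matrix ≠ [])
    (st : List (List (Int × Int)) × PySem.Set Int × PySem.Set Int) (p : Int × Int)
    (hp1 : p.1 ∈ playerList) (hp2 : p.2 ∈ playerList) :
    pvAltPairStep matrix
        ((PySem.Set.ofList playerList).foldl
          (fun d q => d.insert q
            (pvFirstRow matrix (PySem.List.len (PySem.List.pyGetD matrix 0 []))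
              (PySem.List.len matrix) q))
          PySem.Dict.empty)
        (PySem.List.pyGetD matrix 0 [])
        (PySem.List.len (PySem.List.pyGetD matrix 0 [])) st p =
      pvCStep matrix st p := by
  obtain ⟨a, b⟩ := p
  by_cases hab : a = b
  · simp only [pvAltPairStep, pvCStep, pvItems, pvCW, if_pos hab]
  · simp only [pvAltPairStep, if_neg hab]
    have hfa : ((PySem.Set.ofList playerList).foldl
        (fun d q => d.insert q
          (pvFirstRow matrix (PySem.List.len (PySem.List.pyGetD matrix 0 []))
            (PySem.List.len matrix) q)) PySem.Dict.empty).getD a [] =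
        pvFirstRow matrix (PySem.List.len (PySem.List.pyGetD matrix 0 []))
          (PySem.List.len matrix) a :=
      pvDictLookup _ a _ (PySem.Set.nodup_ofList playerList)
        ((PySem.Set.mem_ofList playerList a).mpr hp1) _
    have hfb : ((PySem.Set.ofList playerList).foldl
        (fun d q => d.insert q
          (pvFirstRow matrix (PySem.List.len (PySem.List.pyGetD matrix 0 []))
            (PySem.List.len matrix) q)) PySem.Dict.empty).getD b [] =
        pvFirstRow matrix (PySem.List.len (PySem.List.pyGetD matrix 0 []))
          (PySem.List.len matrix) b :=
      pvDictLookup _ b _ (PySem.Set.nodup_ofList playerList)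
        ((PySem.Set.mem_ofList playerList b).mpr hp2) _
    rw [hfa, hfb]
    have hfold : (PySem.List.pyRange 0 (PySem.List.len (PySem.List.pyGetD matrix 0 [])) 1).foldl
        (fun (s : Int × Int) c =>
          if PySem.List.pyGetD
              (pvFirstRow matrix (PySem.List.len (PySem.List.pyGetD matrix 0 []))
                (PySem.List.len matrix) a) c 0 <
              PySem.List.pyGetD
              (pvFirstRow matrix (PySem.List.len (PySem.List.pyGetD matrix 0 []))
                (PySem.List.len matrix) b) c 0 then
            (s.1 + PySem.List.pyGetD (PySem.List.pyGetD matrix 0 []) c 0, s.2)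
          else if PySem.List.pyGetD
              (pvFirstRow matrix (PySem.List.len (PySem.List.pyGetD matrix 0 []))
                (PySem.List.len matrix) b) c 0 <
              PySem.List.pyGetD
              (pvFirstRow matrix (PySem.List.len (PySem.List.pyGetD matrix 0 []))
                (PySem.List.len matrix) a) c 0 then
            (s.1, s.2 + PySem.List.pyGetD (PySem.List.pyGetD matrix 0 []) c 0)
          else s)
        ((0 : Int), (0 : Int)) = pvS matrix a b := by
      rw [pvS, pvCols]
      refine PySem.List.foldl_congr_mem _ _ _ _ ?_
      intro acc c hc
      rw [PySem.List.mem_pyRange_one] at hc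
      rw [pvFirstRow_lookup matrix a c hc.1 hc.2, pvFirstRow_lookup matrix b c hc.1 hc.2]
      rfl
    rw [hfold]
    simp only [pvCStep, pvItems, pvCW, if_neg hab, pvBA, pvBB]

-- ---- assembling the folds ----

theorem pvGrandA (matrix : List (List Int)) (hm : matrix ≠ []) :
    ∀ (ps : List (Int × Int)) (w0 l0 : PySem.Set Int),
    (ps.map (fun pair => pvBeat (pvPairScore matrix pair))).foldl
        (fun (wl : PySem.Set Int × PySem.Set Int) sb =>
          sb.keys.foldl
            (fun wl player =>
              if sb.getD player 0 ≠ 0 then (PySem.Set.add wl.1 player, wl.2)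
              else (wl.1, PySem.Set.add wl.2 player))
            wl)
        (w0, l0) =
      ps.foldl (fun wl p => pvCW matrix p wl) (w0, l0) := by
  intro ps
  induction ps with
  | nil => intro w0 l0; rfl
  | cons p ps ih =>
    intro w0 l0
    simp only [List.map_cons, List.foldl_cons]
    rw [pvWA_pair matrix hm p (w0, l0),
        show pvCW matrix p (w0, l0) = ((pvCW matrix p (w0, l0)).1, (pvCW matrix p (w0, l0)).2)
          from rfl,
        ih]

theorem pvGrandB (matrix : List (List Int)) :
    ∀ (ps : List (Int × Int)) (sbl0 : List (List (Int × Int))) (w0 l0 : PySem.Set Int),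
    ps.foldl (pvCStep matrix) (sbl0, w0, l0) =
      (sbl0 ++ ps.map (fun p => pvItems matrix p.1 p.2),
       (ps.foldl (fun wl p => pvCW matrix p wl) (w0, l0)).1,
       (ps.foldl (fun wl p => pvCW matrix p wl) (w0, l0)).2) := by
  intro ps
  induction ps with
  | nil => intro sbl0 w0 l0; simp
  | cons p ps ih =>
    intro sbl0 w0 l0
    simp only [List.foldl_cons, List.map_cons]
    rw [show pvCStep matrix (sbl0, w0, l0) p =
          (sbl0 ++ [pvItems matrix p.1 p.2], (pvCW matrix p (w0, l0)).1,
            (pvCW matrix p (w0, l0)).2) from rfl,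
        ih]
    simp

theorem pvFinal (matrix : List (List Int)) (playerList : List Int) (hm : matrix ≠ []) :
    underdogOverriderFinder matrix playerList = underdogOverriderFinder_alt matrix playerList := by
  simp only [underdogOverriderFinder, pvPositiveBeatFinder, pvPathIdentifier,
    underdogOverriderFinder_alt]
  rw [PySem.List.foldl_append_singleton_eq_map, List.nil_append,
      PySem.List.foldl_append_singleton_eq_map, List.nil_append,
      List.map_map]
  simp only [Function.comp_def]
  rw [pvGrandA matrix hm, List.map_map]
  simp only [Function.comp_def]
  rw [List.map_congr_left (fun p _ => pvItems_pair matrix hm p),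
      PySem.List.foldl_congr_mem _ _ (pvCStep matrix) _
        (fun acc p hp => pvAltStep_eq matrix playerList hm acc p
          (pvMem_combSet playerList p hp).1 (pvMem_combSet playerList p hp).2),
      pvGrandB]
  simp

-- ===== VERDICT (by name: the statement is the Claim_ definition above) =====
theorem underdogOverriderFinder_spec : Claim_equal_underdogOverriderFinder := by
  intro matrix playerList _hdom hpre
  unfold Spec_underdogOverriderFinder
  exact pvFinal matrix playerList hpre.1
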